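-- pv_equiv track=rewrite | github.com/xSistted/Object-Oriented-Programming | Lab/Lab1/5.py | sorting_lst
-- ===== SOURCE A (Python) =====
-- def sorting_lst(num_list):
--     if 0 in num_list:
--         not_zero = 0
--         for index, value in enumerate(num_list):
--             if(value != 0):
--                 not_zero = index
--                 break
--         num_list[0], num_list[not_zero] = num_list[not_zero], num_list[0]
--         return num_list
--     else:
--         return num_list
-- ===== SOURCE B (Python) =====
-- def sorting_lst(num_list):
--     # Count the leading zeros instead of searching-and-swapping: the whole
--     # task is "move the first non-zero over the zero prefix".  If the list
--     # starts with k >= 1 zeros and has a non-zero element at index k, the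
--     # answer is [num_list[k]] + [0]*k + num_list[k+1:]; every other list
--     # (empty, all-zero, or starting non-zero) is returned unchanged.
--     # Mutates num_list in place via slice assignment, like A's swap.
--     k = 0
--     while k < len(num_list) and num_list[k] == 0:
--         k += 1
--     if 0 < k < len(num_list):
--         num_list[:] = [num_list[k]] + [0] * k + num_list[k + 1:]
--     return num_list
-- ===== Notes on version B (the rewrite author's own statement) =====
-- stated objective: alternative
-- what changed: Replaces A's membership scan + enumerate-search + element swap by counting the zero-prefix length k and, when 0 < k < len, rebuilding the list in one slice assignment as [num_list[k]] + [0]*k + the tail; otherwise the list is returned untouched, with no swap anywhere.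
import Mathlib
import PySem

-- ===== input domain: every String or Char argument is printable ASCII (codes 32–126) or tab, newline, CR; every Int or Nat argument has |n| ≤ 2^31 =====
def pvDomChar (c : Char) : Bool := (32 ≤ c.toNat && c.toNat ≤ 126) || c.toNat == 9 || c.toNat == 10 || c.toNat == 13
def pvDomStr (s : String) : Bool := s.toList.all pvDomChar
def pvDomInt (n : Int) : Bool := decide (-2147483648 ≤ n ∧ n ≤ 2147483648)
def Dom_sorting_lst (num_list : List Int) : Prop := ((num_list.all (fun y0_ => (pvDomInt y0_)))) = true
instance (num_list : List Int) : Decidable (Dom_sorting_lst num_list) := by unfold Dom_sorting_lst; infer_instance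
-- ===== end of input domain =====

-- B replaces A's membership scan + enumerate-search + swap by counting the zero
-- prefix and rebuilding the list as first-nonzero :: k zeros ++ tail (alternative).
-- Both Pythons mutate the argument in place; the equivalence proved is about the
-- return value (B performs the same in-place update via slice assignment).


-- ===== PORT A =====
-- A's 'for index, value in enumerate(...): if value != 0: not_zero = index; break'
-- with not_zero initialised to 0: first non-zero index, else 0.
def findNZ : List Int → Nat → Nat
  | [], _ => 0
  | v :: rest, i => if v ≠ 0 then i else findNZ rest (i + 1)

def sorting_lst (num_list : List Int) : List Int :=
  if num_list.contains 0 then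
    let not_zero := findNZ num_list 0
    -- num_list[0], num_list[not_zero] = num_list[not_zero], num_list[0]
    (num_list.set 0 (num_list.getD not_zero 0)).set not_zero (num_list.getD 0 0)
  else
    num_list

-- ===== PORT B =====
-- B's 'while k < len and num_list[k] == 0: k += 1' as structural recursion.
def countLeadZeros : List Int → Nat
  | [] => 0
  | v :: rest => if v = 0 then countLeadZeros rest + 1 else 0

def sorting_lst_alt (num_list : List Int) : List Int :=
  let k := countLeadZeros num_list
  if 0 < k ∧ k < num_list.length then
    -- [num_list[k]] + [0]*k + num_list[k+1:] (index k valid since k < len)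
    num_list.getD k 0 :: (List.replicate k 0 ++ num_list.drop (k + 1))
  else
    num_list

-- ===== PRECONDITION & SPEC =====
def Spec_sorting_lst (num_list : List Int) (out : List Int) : Prop := out = sorting_lst_alt num_list
instance (num_list : List Int) (out : List Int) : Decidable (Spec_sorting_lst num_list out) := by unfold Spec_sorting_lst; infer_instance

-- ===== CLAIM (what is proved, stated in full; the proofs are below) =====
def Claim_equal_sorting_lst : Prop := ∀ (num_list : List Int), Dom_sorting_lst num_list → Spec_sorting_lst num_list (sorting_lst num_list)

-- ===== LEMMAS AND PROOFS =====

-- A list whose zero-prefix count is strictly below its length splits as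
-- (replicate k 0) ++ v :: rest with v ≠ 0.
theorem cz_shape : ∀ (l : List Int), countLeadZeros l < l.length →
    ∃ v rest, v ≠ 0 ∧ l = List.replicate (countLeadZeros l) 0 ++ v :: rest := by
  intro l
  induction l with
  | nil => simp
  | cons a t ih =>
    intro h
    by_cases ha : a = 0
    · subst ha
      have h' : countLeadZeros t < t.length := by
        simpa [countLeadZeros] using h
      obtain ⟨v, rest, hv, ht⟩ := ih h'
      exact ⟨v, rest, hv, by simp [countLeadZeros, List.replicate]; exact ht⟩
    · exact ⟨a, t, ha, by simp [countLeadZeros, ha]⟩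

-- If the whole list is leading zeros, every element is zero.
theorem cz_all_zero : ∀ (l : List Int), l.length ≤ countLeadZeros l → ∀ v ∈ l, v = 0 := by
  intro l
  induction l with
  | nil => simp
  | cons a t ih =>
    intro h
    by_cases ha : a = 0
    · subst ha
      have h' : t.length ≤ countLeadZeros t := by
        simpa [countLeadZeros] using h
      intro v hv
      rcases List.mem_cons.1 hv with h0 | h1
      · exact h0
      · exact ih h' v h1
    · simp [countLeadZeros, ha] at h

theorem findNZ_all_zero (l : List Int) (i : Nat)
    (h : ∀ v ∈ l, v = 0) : findNZ l i = 0 := by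
  induction l generalizing i with
  | nil => rfl
  | cons v t ih =>
    have hv : v = 0 := h v (by simp)
    simp [findNZ, hv]
    exact ih _ (fun w hw => h w (by simp [hw]))

theorem findNZ_rep (k : Nat) (v : Int) (rest : List Int) (i : Nat) (hv : v ≠ 0) :
    findNZ (List.replicate k 0 ++ v :: rest) i = k + i := by
  induction k generalizing i with
  | zero => simp [findNZ, hv]
  | succ n ih =>
    simp only [List.replicate_succ, List.cons_append, findNZ]
    rw [if_neg (by simp), ih (i + 1)]
    omega

theorem getD_rep (k : Nat) (v : Int) (rest : List Int) (d : Int) :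
    (List.replicate k (0 : Int) ++ v :: rest).getD k d = v := by
  induction k with
  | zero => simp
  | succ n ih => simpa [List.replicate] using ih

theorem set_rep (k : Nat) (x : Int) (v : Int) (rest : List Int) :
    (List.replicate k (0 : Int) ++ v :: rest).set k x = List.replicate k 0 ++ x :: rest := by
  induction k with
  | zero => simp
  | succ n ih => simpa [List.replicate] using ih

theorem drop_rep (k : Nat) (v : Int) (rest : List Int) :
    (List.replicate k (0 : Int) ++ v :: rest).drop (k + 1) = rest := by
  induction k with
  | zero => simp
  | succ n ih => simpa [List.replicate] using ih

-- A no-op swap at index 0 leaves a list unchanged.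
theorem set_set_zero_self (l : List Int) (hl : l ≠ []) :
    (l.set 0 (l.getD 0 0)).set 0 (l.getD 0 0) = l := by
  cases l with
  | nil => simp at hl
  | cons a t => simp [List.set]

-- ===== VERDICT (by name: the statement is the Claim_ definition above) =====
theorem sorting_lst_spec : Claim_equal_sorting_lst := by
  intro l _
  show sorting_lst l = sorting_lst_alt l
  unfold sorting_lst sorting_lst_alt
  by_cases hkl : countLeadZeros l < l.length
  · obtain ⟨v, rest, hv, hl⟩ := cz_shape l hkl
    by_cases hk0 : 0 < countLeadZeros l
    · -- leading zeros exist, so 0 ∈ l and A swaps index 0 with index k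
      obtain ⟨n, hn⟩ : ∃ n, countLeadZeros l = n + 1 := ⟨countLeadZeros l - 1, by omega⟩
      have hz : l.contains 0 := by
        rw [hl, hn]
        simp [List.replicate]
      simp only [hz, if_true, hk0, hkl, and_true, if_true]
      rw [hn] at hl ⊢
      rw [hl]
      rw [findNZ_rep _ _ _ _ hv]
      simp only [Nat.add_zero]
      rw [getD_rep]
      have h0 : (List.replicate (n + 1) (0 : Int) ++ v :: rest).getD 0 0 = 0 := by
        simp [List.replicate]
      rw [h0]
      -- now set index n+1 of v :: replicate (n+1) 0 ++ rest ... compute both sides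
      have : (List.replicate (n + 1) (0 : Int) ++ v :: rest).drop (n + 1 + 1) = rest :=
        drop_rep (n + 1) v rest
      rw [this]
      -- LHS: (replicate (n+1) 0 ++ v :: rest) with pos 0 := v, then pos (n+1) := 0
      -- replicate (n+1) 0 = 0 :: replicate n 0
      show ((0 :: List.replicate n (0:Int) ++ v :: rest).set 0 v).set (n + 1) 0 =
        v :: (List.replicate (n + 1) 0 ++ rest)
      simp only [List.cons_append, List.set]
      have := set_rep n (0 : Int) v rest
      rw [this]
      simp [List.replicate_succ']
    · -- k = 0: the list starts with a non-zero element; any swap is a no-op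
      have hk : countLeadZeros l = 0 := by omega
      rw [hk] at hl
      simp only [List.replicate, List.nil_append] at hl
      simp only [hk, Nat.lt_irrefl, false_and, if_false]
      by_cases hz : l.contains 0
      · simp only [hz, if_true]
        have hf : findNZ l 0 = 0 := by
          rw [hl]; simp [findNZ, hv]
        rw [hf]
        exact set_set_zero_self l (by rw [hl]; simp)
      · rw [if_neg hz]
  · -- the list is all zeros (or empty): both sides return l
    have hall : ∀ w ∈ l, w = 0 := cz_all_zero l (by omega)
    simp only [hkl, and_false, if_false]
    by_cases hz : l.contains 0
    · simp only [hz, if_true]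
      rw [findNZ_all_zero l 0 hall]
      exact set_set_zero_self l (by intro h; subst h; simp at hz)
    · rw [if_neg hz]
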